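-- pv_equiv track=rewrite | github.com/CzartB1/solo-ttrpg-ai | retrieval.py | _apply_budget
-- ===== SOURCE A (Python) =====
-- BUDGET_CHARS = 6000   # ~1500 tokens for world context
--
-- def _apply_budget(loaded: dict, master_block: str) -> list[str]:
--     """
--     Trim entity blocks to fit within BUDGET_CHARS.
--     Priority: named > minor > archetype/basic.
--     """
--     used  = len(master_block)
--     blocks = []
--
--     priority = {"named": 0, "advanced": 0, "minor": 1, "basic": 2,
--                 "archetype": 3, "": 4}
--     items = sorted(loaded.items(),
--                    key=lambda kv: priority.get(
--                        kv[1].split("\n")[0].split("(")[0].strip().lower(), 4))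
--
--     for eid, block in items:
--         if used + len(block) + 2 > BUDGET_CHARS:
--             break
--         blocks.append(block)
--         used += len(block) + 2
--
--     return blocks
-- ===== SOURCE B (Python) =====
-- BUDGET_CHARS = 6000   # ~1500 tokens for world context
--
-- def _apply_budget(loaded: dict, master_block: str) -> list[str]:
--     # Bucket the blocks by the 5 fixed priority levels (stable within each
--     # bucket), then run the greedy budget loop over the buckets in order.
--     buckets = [[], [], [], [], []]
--     for eid, block in loaded.items():
--         head = block.split("\n")[0].split("(")[0].strip().lower()
--         if head == "named" or head == "advanced":
--             p = 0
--         elif head == "minor":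
--             p = 1
--         elif head == "basic":
--             p = 2
--         elif head == "archetype":
--             p = 3
--         else:
--             p = 4
--         buckets[p].append((eid, block))
--     used = len(master_block)
--     blocks = []
--     for bucket in buckets:
--         for eid, block in bucket:
--             if used + len(block) + 2 > BUDGET_CHARS:
--                 return blocks
--             blocks.append(block)
--             used += len(block) + 2
--     return blocks
-- ===== Notes on version B (the rewrite author's own statement) =====
-- stated objective: alternative
-- what changed: Replaces the comparison sort over the priority key by a single bucketing pass into the 5 fixed priority levels (stable within each level), then runs the same greedy budget loop over the buckets in order.
import Mathlib
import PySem

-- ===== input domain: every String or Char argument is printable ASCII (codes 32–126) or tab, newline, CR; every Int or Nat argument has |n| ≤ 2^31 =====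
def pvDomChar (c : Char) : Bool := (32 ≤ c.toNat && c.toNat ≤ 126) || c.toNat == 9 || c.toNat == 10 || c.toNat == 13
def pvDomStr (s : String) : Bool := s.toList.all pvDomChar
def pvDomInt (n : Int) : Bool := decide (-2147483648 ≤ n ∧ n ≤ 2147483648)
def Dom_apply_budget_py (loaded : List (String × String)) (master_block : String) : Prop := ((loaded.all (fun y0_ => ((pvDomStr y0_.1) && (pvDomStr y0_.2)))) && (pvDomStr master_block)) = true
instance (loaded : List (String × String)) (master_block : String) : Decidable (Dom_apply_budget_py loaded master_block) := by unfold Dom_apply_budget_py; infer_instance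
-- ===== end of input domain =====

-- B replaces A's comparison sort over the priority key by a single bucketing
-- pass over the 5 fixed priority levels (same stable order, same greedy loop).

-- ===== PORT A =====

-- shared by both ports (both Pythons compute the priority head identically):
-- block.split("\n")[0].split("(")[0].strip().lower()
def pvHead (block : String) : String :=
  PySem.Str.lower (PySem.Str.strip
    (PySem.List.pyGetD
      ((PySem.Str.split? (PySem.List.pyGetD ((PySem.Str.split? block "\n").getD []) 0 "") "(").getD [])
      0 ""))

def pvPriority : PySem.Dict String Int :=
  PySem.Dict.ofList [("named", 0), ("advanced", 0), ("minor", 1), ("basic", 2), ("archetype", 3), ("", 4)]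

def pvKeyA (block : String) : Int :=
  PySem.Dict.getD pvPriority (pvHead block) 4

-- the 'for eid, block in items' loop with its break
def pvLoopA : List (String × String) → Int → List String → List String
  | [], _, blocks => blocks
  | (_, block) :: rest, used, blocks =>
    if 6000 < used + PySem.Str.len block + 2 then blocks
    else pvLoopA rest (used + PySem.Str.len block + 2) (blocks ++ [block])

def apply_budget_py (loaded : List (String × String)) (master_block : String) : List String :=
  pvLoopA (PySem.List.sorted loaded (fun kv => pvKeyA kv.2)) (PySem.Str.len master_block) []

-- ===== PORT B =====

-- the if/elif chain of Source B
def pvPrioB (block : String) : Int :=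
  let head := pvHead block
  if head = "named" ∨ head = "advanced" then 0
  else if head = "minor" then 1
  else if head = "basic" then 2
  else if head = "archetype" then 3
  else 4

-- buckets[p].append((eid, block))
def pvBDrop (bs : List (String × String) × List (String × String) × List (String × String) × List (String × String) × List (String × String))
    (kv : String × String) :
    List (String × String) × List (String × String) × List (String × String) × List (String × String) × List (String × String) :=
  let p := pvPrioB kv.2
  if p = 0 then (bs.1 ++ [kv], bs.2.1, bs.2.2.1, bs.2.2.2.1, bs.2.2.2.2)
  else if p = 1 then (bs.1, bs.2.1 ++ [kv], bs.2.2.1, bs.2.2.2.1, bs.2.2.2.2)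
  else if p = 2 then (bs.1, bs.2.1, bs.2.2.1 ++ [kv], bs.2.2.2.1, bs.2.2.2.2)
  else if p = 3 then (bs.1, bs.2.1, bs.2.2.1, bs.2.2.2.1 ++ [kv], bs.2.2.2.2)
  else (bs.1, bs.2.1, bs.2.2.1, bs.2.2.2.1, bs.2.2.2.2 ++ [kv])

-- 'for bucket in buckets: for eid, block in bucket: …' with the early return
def pvLoopB : List (String × String) → List (List (String × String)) → Int → List String → List String
  | [], [], _, blocks => blocks
  | [], b :: bsrest, used, blocks => pvLoopB b bsrest used blocks
  | (_, block) :: tl, bsrest, used, blocks =>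
    if 6000 < used + PySem.Str.len block + 2 then blocks
    else pvLoopB tl bsrest (used + PySem.Str.len block + 2) (blocks ++ [block])

def apply_budget_py_alt (loaded : List (String × String)) (master_block : String) : List String :=
  let bs := loaded.foldl pvBDrop ([], [], [], [], [])
  pvLoopB bs.1 [bs.2.1, bs.2.2.1, bs.2.2.2.1, bs.2.2.2.2] (PySem.Str.len master_block) []

-- ===== PRECONDITION & SPEC =====
def Spec_apply_budget_py (loaded : List (String × String)) (master_block : String) (out : List String) : Prop := out = apply_budget_py_alt loaded master_block
instance (loaded : List (String × String)) (master_block : String) (out : List String) : Decidable (Spec_apply_budget_py loaded master_block out) := by unfold Spec_apply_budget_py; infer_instance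

-- ===== CLAIM (what is proved, stated in full; the proofs are below) =====
def Claim_equal_apply_budget_py : Prop := ∀ (loaded : List (String × String)) (master_block : String), Dom_apply_budget_py loaded master_block → Spec_apply_budget_py loaded master_block (apply_budget_py loaded master_block)

-- ===== LEMMAS AND PROOFS =====

theorem pvGetNil {κ ν : Type} [BEq κ] (k : κ) : (PySem.Dict.mk ([] : List (κ × ν))).get? k = none := rfl

set_option maxRecDepth 4096 in
theorem keyA_eq_prioB (block : String) : pvKeyA block = pvPrioB block := by
  unfold pvKeyA pvPrioB
  have hp : pvPriority = PySem.Dict.mk [("named", 0), ("advanced", 0), ("minor", 1), ("basic", 2), ("archetype", 3), ("", 4)] := rfl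
  rw [hp]
  generalize pvHead block = head
  simp only [PySem.Dict.getD_eq_get?_getD, PySem.Dict.get?_mk_cons, pvGetNil, beq_iff_eq]
  by_cases h1 : head = "named" <;> by_cases h2 : head = "advanced" <;>
    by_cases h3 : head = "minor" <;> by_cases h4 : head = "basic" <;>
    by_cases h5 : head = "archetype" <;> by_cases h6 : head = "" <;>
    simp [h1, h2, h3, h4, h5, h6, @eq_comm String "named" head, @eq_comm String "advanced" head,
      @eq_comm String "minor" head, @eq_comm String "basic" head, @eq_comm String "archetype" head,
      @eq_comm String "" head]

theorem prioB_cases (block : String) :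
    pvPrioB block = 0 ∨ pvPrioB block = 1 ∨ pvPrioB block = 2 ∨ pvPrioB block = 3 ∨ pvPrioB block = 4 := by
  unfold pvPrioB
  dsimp only
  split_ifs <;> simp

theorem insertBy_append_of_not {α : Type} (before : α → α → Bool) (x : α) (pre suf : List α)
    (h : ∀ y ∈ pre, before x y = false) :
    PySem.List.insertBy before x (pre ++ suf) = pre ++ PySem.List.insertBy before x suf := by
  induction pre with
  | nil => simp
  | cons z zs ih =>
    have hz : before x z = false := h z (by simp)
    simp [PySem.List.insertBy, hz]
    exact ih (fun y hy => h y (by simp [hy]))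

theorem insertBy_of_all_before {α : Type} (before : α → α → Bool) (x : α) (suf : List α)
    (h : ∀ y ∈ suf, before x y = true) :
    PySem.List.insertBy before x suf = x :: suf := by
  cases suf with
  | nil => simp [PySem.List.insertBy]
  | cons z zs => simp [PySem.List.insertBy, h z (by simp)]


-- inserting x into the five concatenated buckets of xs lands at the end of its bucket
theorem insertBy_buckets (x : String × String) (xs : List (String × String)) :
    PySem.List.insertBy (fun a b => decide (pvPrioB a.2 < pvPrioB b.2)) x
      (xs.filter (fun kv => pvPrioB kv.2 = 0) ++ xs.filter (fun kv => pvPrioB kv.2 = 1) ++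
       xs.filter (fun kv => pvPrioB kv.2 = 2) ++ xs.filter (fun kv => pvPrioB kv.2 = 3) ++
       xs.filter (fun kv => pvPrioB kv.2 = 4)) =
      (xs ++ [x]).filter (fun kv => pvPrioB kv.2 = 0) ++ (xs ++ [x]).filter (fun kv => pvPrioB kv.2 = 1) ++
      (xs ++ [x]).filter (fun kv => pvPrioB kv.2 = 2) ++ (xs ++ [x]).filter (fun kv => pvPrioB kv.2 = 3) ++
      (xs ++ [x]).filter (fun kv => pvPrioB kv.2 = 4) := by
  have mf : ∀ (i : Int) (y : String × String), y ∈ xs.filter (fun kv => pvPrioB kv.2 = i) → pvPrioB y.2 = i := by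
    intro i y hy
    simpa using (List.mem_filter.mp hy).2
  rcases prioB_cases x.2 with h | h | h | h | h <;>
    simp only [List.filter_append, List.filter_cons, List.filter_nil, h, List.append_assoc] <;> norm_num
  ·
    have c0 : ∀ y ∈ List.filter (fun kv => decide (pvPrioB kv.2 = 0)) xs,
        decide (pvPrioB x.2 < pvPrioB y.2) = false := by
      intro y hy; simp [h, mf 0 y hy]
    have hsuf : ∀ y ∈ List.filter (fun kv => decide (pvPrioB kv.2 = 1)) xs ++ (List.filter (fun kv => decide (pvPrioB kv.2 = 2)) xs ++ (List.filter (fun kv => decide (pvPrioB kv.2 = 3)) xs ++ (List.filter (fun kv => decide (pvPrioB kv.2 = 4)) xs))),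
        decide (pvPrioB x.2 < pvPrioB y.2) = true := by
      intro y hy
      simp only [List.mem_append] at hy
      rcases hy with hy | hy | hy | hy
      · simp [h, mf 1 y hy]
      · simp [h, mf 2 y hy]
      · simp [h, mf 3 y hy]
      · simp [h, mf 4 y hy]
    rw [insertBy_append_of_not (fun a b : String × String => decide (pvPrioB a.2 < pvPrioB b.2)) x _ _ c0, insertBy_of_all_before (fun a b : String × String => decide (pvPrioB a.2 < pvPrioB b.2)) x _ hsuf]
  ·
    have c0 : ∀ y ∈ List.filter (fun kv => decide (pvPrioB kv.2 = 0)) xs,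
        decide (pvPrioB x.2 < pvPrioB y.2) = false := by
      intro y hy; simp [h, mf 0 y hy]
    have c1 : ∀ y ∈ List.filter (fun kv => decide (pvPrioB kv.2 = 1)) xs,
        decide (pvPrioB x.2 < pvPrioB y.2) = false := by
      intro y hy; simp [h, mf 1 y hy]
    have hsuf : ∀ y ∈ List.filter (fun kv => decide (pvPrioB kv.2 = 2)) xs ++ (List.filter (fun kv => decide (pvPrioB kv.2 = 3)) xs ++ (List.filter (fun kv => decide (pvPrioB kv.2 = 4)) xs)),
        decide (pvPrioB x.2 < pvPrioB y.2) = true := by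
      intro y hy
      simp only [List.mem_append] at hy
      rcases hy with hy | hy | hy
      · simp [h, mf 2 y hy]
      · simp [h, mf 3 y hy]
      · simp [h, mf 4 y hy]
    rw [insertBy_append_of_not (fun a b : String × String => decide (pvPrioB a.2 < pvPrioB b.2)) x _ _ c0, insertBy_append_of_not (fun a b : String × String => decide (pvPrioB a.2 < pvPrioB b.2)) x _ _ c1, insertBy_of_all_before (fun a b : String × String => decide (pvPrioB a.2 < pvPrioB b.2)) x _ hsuf]
  ·
    have c0 : ∀ y ∈ List.filter (fun kv => decide (pvPrioB kv.2 = 0)) xs,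
        decide (pvPrioB x.2 < pvPrioB y.2) = false := by
      intro y hy; simp [h, mf 0 y hy]
    have c1 : ∀ y ∈ List.filter (fun kv => decide (pvPrioB kv.2 = 1)) xs,
        decide (pvPrioB x.2 < pvPrioB y.2) = false := by
      intro y hy; simp [h, mf 1 y hy]
    have c2 : ∀ y ∈ List.filter (fun kv => decide (pvPrioB kv.2 = 2)) xs,
        decide (pvPrioB x.2 < pvPrioB y.2) = false := by
      intro y hy; simp [h, mf 2 y hy]
    have hsuf : ∀ y ∈ List.filter (fun kv => decide (pvPrioB kv.2 = 3)) xs ++ (List.filter (fun kv => decide (pvPrioB kv.2 = 4)) xs),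
        decide (pvPrioB x.2 < pvPrioB y.2) = true := by
      intro y hy
      simp only [List.mem_append] at hy
      rcases hy with hy | hy
      · simp [h, mf 3 y hy]
      · simp [h, mf 4 y hy]
    rw [insertBy_append_of_not (fun a b : String × String => decide (pvPrioB a.2 < pvPrioB b.2)) x _ _ c0, insertBy_append_of_not (fun a b : String × String => decide (pvPrioB a.2 < pvPrioB b.2)) x _ _ c1, insertBy_append_of_not (fun a b : String × String => decide (pvPrioB a.2 < pvPrioB b.2)) x _ _ c2, insertBy_of_all_before (fun a b : String × String => decide (pvPrioB a.2 < pvPrioB b.2)) x _ hsuf]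
  ·
    have c0 : ∀ y ∈ List.filter (fun kv => decide (pvPrioB kv.2 = 0)) xs,
        decide (pvPrioB x.2 < pvPrioB y.2) = false := by
      intro y hy; simp [h, mf 0 y hy]
    have c1 : ∀ y ∈ List.filter (fun kv => decide (pvPrioB kv.2 = 1)) xs,
        decide (pvPrioB x.2 < pvPrioB y.2) = false := by
      intro y hy; simp [h, mf 1 y hy]
    have c2 : ∀ y ∈ List.filter (fun kv => decide (pvPrioB kv.2 = 2)) xs,
        decide (pvPrioB x.2 < pvPrioB y.2) = false := by
      intro y hy; simp [h, mf 2 y hy]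
    have c3 : ∀ y ∈ List.filter (fun kv => decide (pvPrioB kv.2 = 3)) xs,
        decide (pvPrioB x.2 < pvPrioB y.2) = false := by
      intro y hy; simp [h, mf 3 y hy]
    have hsuf : ∀ y ∈ List.filter (fun kv => decide (pvPrioB kv.2 = 4)) xs,
        decide (pvPrioB x.2 < pvPrioB y.2) = true := by
      intro y hy
      simp [h, mf 4 y hy]
    rw [insertBy_append_of_not (fun a b : String × String => decide (pvPrioB a.2 < pvPrioB b.2)) x _ _ c0, insertBy_append_of_not (fun a b : String × String => decide (pvPrioB a.2 < pvPrioB b.2)) x _ _ c1, insertBy_append_of_not (fun a b : String × String => decide (pvPrioB a.2 < pvPrioB b.2)) x _ _ c2, insertBy_append_of_not (fun a b : String × String => decide (pvPrioB a.2 < pvPrioB b.2)) x _ _ c3, insertBy_of_all_before (fun a b : String × String => decide (pvPrioB a.2 < pvPrioB b.2)) x _ hsuf]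
  ·
    have c0 : ∀ y ∈ List.filter (fun kv => decide (pvPrioB kv.2 = 0)) xs,
        decide (pvPrioB x.2 < pvPrioB y.2) = false := by
      intro y hy; simp [h, mf 0 y hy]
    have c1 : ∀ y ∈ List.filter (fun kv => decide (pvPrioB kv.2 = 1)) xs,
        decide (pvPrioB x.2 < pvPrioB y.2) = false := by
      intro y hy; simp [h, mf 1 y hy]
    have c2 : ∀ y ∈ List.filter (fun kv => decide (pvPrioB kv.2 = 2)) xs,
        decide (pvPrioB x.2 < pvPrioB y.2) = false := by
      intro y hy; simp [h, mf 2 y hy]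
    have c3 : ∀ y ∈ List.filter (fun kv => decide (pvPrioB kv.2 = 3)) xs,
        decide (pvPrioB x.2 < pvPrioB y.2) = false := by
      intro y hy; simp [h, mf 3 y hy]
    have c4 : ∀ y ∈ List.filter (fun kv => decide (pvPrioB kv.2 = 4)) xs,
        decide (pvPrioB x.2 < pvPrioB y.2) = false := by
      intro y hy; simp [h, mf 4 y hy]
    rw [insertBy_append_of_not (fun a b : String × String => decide (pvPrioB a.2 < pvPrioB b.2)) x _ _ c0, insertBy_append_of_not (fun a b : String × String => decide (pvPrioB a.2 < pvPrioB b.2)) x _ _ c1, insertBy_append_of_not (fun a b : String × String => decide (pvPrioB a.2 < pvPrioB b.2)) x _ _ c2, insertBy_append_of_not (fun a b : String × String => decide (pvPrioB a.2 < pvPrioB b.2)) x _ _ c3, PySem.List.insertBy_of_forall_not_before (fun a b : String × String => decide (pvPrioB a.2 < pvPrioB b.2)) x _ c4]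

-- sorted by pvPrioB = the five filter buckets concatenated
theorem sorted_eq_buckets (xs : List (String × String)) :
    PySem.List.sorted xs (fun kv => pvPrioB kv.2) =
      xs.filter (fun kv => pvPrioB kv.2 = 0) ++ xs.filter (fun kv => pvPrioB kv.2 = 1) ++
      xs.filter (fun kv => pvPrioB kv.2 = 2) ++ xs.filter (fun kv => pvPrioB kv.2 = 3) ++
      xs.filter (fun kv => pvPrioB kv.2 = 4) := by
  induction xs using List.reverseRecOn with
  | nil => simp [PySem.List.sorted_eq_foldl_insertBy]
  | append_singleton xs x ih =>
    rw [PySem.List.sorted_eq_foldl_insertBy, List.foldl_append, List.foldl_cons, List.foldl_nil,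
      ← PySem.List.sorted_eq_foldl_insertBy, ih]
    exact insertBy_buckets x xs

theorem foldl_bdrop (xs : List (String × String))
    (p0 p1 p2 p3 p4 : List (String × String)) :
    xs.foldl pvBDrop (p0, p1, p2, p3, p4) =
      (p0 ++ xs.filter (fun kv => pvPrioB kv.2 = 0),
       p1 ++ xs.filter (fun kv => pvPrioB kv.2 = 1),
       p2 ++ xs.filter (fun kv => pvPrioB kv.2 = 2),
       p3 ++ xs.filter (fun kv => pvPrioB kv.2 = 3),
       p4 ++ xs.filter (fun kv => pvPrioB kv.2 = 4)) := by
  induction xs generalizing p0 p1 p2 p3 p4 with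
  | nil => simp
  | cons x tl ih =>
    rcases prioB_cases x.2 with h | h | h | h | h <;>
      simp [List.foldl_cons, pvBDrop, h, ih]

theorem loopB_eq_loopA (bsrest : List (List (String × String))) :
    ∀ (cur : List (String × String)) (used : Int) (blocks : List String),
    pvLoopB cur bsrest used blocks = pvLoopA (cur ++ bsrest.flatten) used blocks := by
  induction bsrest with
  | nil =>
    intro cur
    induction cur with
    | nil => intro used blocks; simp [pvLoopB, pvLoopA]
    | cons kv tl ih =>
      intro used blocks
      obtain ⟨e, block⟩ := kv
      simp only [pvLoopB, pvLoopA, List.flatten_nil, List.append_nil] at *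
      split <;> simp [ih]
  | cons b bs ih =>
    intro cur
    induction cur with
    | nil => intro used blocks; simpa [pvLoopB] using ih b used blocks
    | cons kv tl ihc =>
      intro used blocks
      obtain ⟨e, block⟩ := kv
      simp only [pvLoopB, pvLoopA, List.cons_append]
      split <;> simp [ihc]

-- ===== VERDICT (by name: the statement is the Claim_ definition above) =====
theorem apply_budget_py_spec : Claim_equal_apply_budget_py := by
  intro loaded master_block _
  unfold Spec_apply_budget_py apply_budget_py apply_budget_py_alt
  have hk : (fun kv : String × String => pvKeyA kv.2) = (fun kv => pvPrioB kv.2) := by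
    funext kv; exact keyA_eq_prioB kv.2
  rw [hk, sorted_eq_buckets, foldl_bdrop, loopB_eq_loopA]
  simp
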